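-- pv_equiv track=rewrite | github.com/athdot/jeeves | utils/utils.py | p_time
-- ===== SOURCE A (Python) =====
-- def p_time(timeToOpen):
--     time_list = []
--     if int(timeToOpen / (60 * 24)) > 0:
--         time_list.append(str(int(timeToOpen / (60 * 24))) + " day")
--         if int(timeToOpen / (60 * 24)) > 1:
--             time_list[len(time_list) - 1] = time_list[len(time_list) - 1] + "s"
--     if int(timeToOpen / 60) % 24 > 0:
--         time_list.append(str(int(timeToOpen / 60) % 24) + " hour")
--         if int(timeToOpen / 60) % 24 > 1:
--             time_list[len(time_list) - 1] = time_list[len(time_list) - 1] + "s"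
--     if timeToOpen % 60 > 0:
--         time_list.append(str(timeToOpen % 60) + " minute")
--         if timeToOpen % 60 > 1:
--             time_list[len(time_list) - 1] = time_list[len(time_list) - 1] + "s"
--
--     if len(time_list) > 2:
--         time_list[len(time_list) - 1] = "and " + time_list[len(time_list) - 1]
--         time_list = [", " + s for s in time_list]
--         time_list[0] = time_list[0][2:]
--     else:
--         if len(time_list) > 1:
--             time_list[len(time_list) - 1] = " and " + time_list[len(time_list) - 1]
--
--     return "".join(time_list)
-- ===== SOURCE B (Python) =====
-- def p_time(timeToOpen):
--     days = int(timeToOpen / 1440)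
--     hours = int(timeToOpen / 60) % 24
--     minutes = timeToOpen % 60
--
--     def unit(v, name):
--         return f"{v} {name}" + ("s" if v > 1 else "")
--
--     match (days > 0, hours > 0, minutes > 0):
--         case (False, False, False):
--             return ""
--         case (False, False, True):
--             return unit(minutes, "minute")
--         case (False, True, False):
--             return unit(hours, "hour")
--         case (True, False, False):
--             return unit(days, "day")
--         case (False, True, True):
--             return unit(hours, "hour") + " and " + unit(minutes, "minute")
--         case (True, False, True):
--             return unit(days, "day") + " and " + unit(minutes, "minute")
--         case (True, True, False):
--             return unit(days, "day") + " and " + unit(hours, "hour")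
--         case (True, True, True):
--             return (unit(days, "day") + ", " + unit(hours, "hour")
--                     + ", and " + unit(minutes, "minute"))
-- ===== Notes on version B (the rewrite author's own statement) =====
-- stated objective: simpler
-- what changed: Replaces A's list construction with in-place last-element surgery (appending parts, rewriting the last element for plural 's' and for 'and', mapping ', ' over every element and slicing it off the first, then joining) by a listless table dispatch: compute the three unit values once and match on the presence pattern (days>0, hours>0, minutes>0), returning one explicit format expression per case.
import Mathlib
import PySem

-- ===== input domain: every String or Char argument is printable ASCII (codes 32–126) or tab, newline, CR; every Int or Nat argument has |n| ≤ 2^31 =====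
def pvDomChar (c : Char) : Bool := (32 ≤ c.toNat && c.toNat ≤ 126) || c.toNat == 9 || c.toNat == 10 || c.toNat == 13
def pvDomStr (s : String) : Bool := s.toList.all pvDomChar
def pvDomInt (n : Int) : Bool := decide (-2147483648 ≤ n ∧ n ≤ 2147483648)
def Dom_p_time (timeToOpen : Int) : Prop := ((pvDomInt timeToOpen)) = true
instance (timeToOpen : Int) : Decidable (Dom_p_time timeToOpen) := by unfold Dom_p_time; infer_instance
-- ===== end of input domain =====

-- B replaces A's append-then-mutate-last list surgery and join passes with a listless
-- table dispatch on the presence pattern of (days, hours, minutes) (objective: simpler);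
-- equal return value on every Int input.


-- ===== PORT A =====
-- Python's `time_list[len(time_list) - 1] = f(time_list[len(time_list) - 1])` (exact: pySetD/pyGetD
-- at index len-1; the list is nonempty at every use site, so the pyGetD default is never read).
def pvModLast (l : List String) (f : String → String) : List String :=
  PySem.List.pySetD l ((l.length : Int) - 1) (f (PySem.List.pyGetD l ((l.length : Int) - 1) ""))

-- `int(timeToOpen / (60 * 24))`: float true division then int() truncates toward zero = Int.tdiv;
-- exact here because for |timeToOpen| ≤ 2^31 the float quotient's rounding error is below 1/1440,
-- so truncation of the rounded quotient equals truncation of the exact one.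
def p_time (timeToOpen : Int) : String :=
  let time_list : List String := []
  let time_list :=
    if Int.tdiv timeToOpen (60 * 24) > 0 then
      let time_list := time_list ++ [PySem.Int.toStr (Int.tdiv timeToOpen (60 * 24)) ++ " day"]
      if Int.tdiv timeToOpen (60 * 24) > 1 then pvModLast time_list (fun s => s ++ "s")
      else time_list
    else time_list
  let time_list :=
    if PySem.Int.mod (Int.tdiv timeToOpen 60) 24 > 0 then
      let time_list :=
        time_list ++ [PySem.Int.toStr (PySem.Int.mod (Int.tdiv timeToOpen 60) 24) ++ " hour"]
      if PySem.Int.mod (Int.tdiv timeToOpen 60) 24 > 1 then pvModLast time_list (fun s => s ++ "s")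
      else time_list
    else time_list
  let time_list :=
    if PySem.Int.mod timeToOpen 60 > 0 then
      let time_list := time_list ++ [PySem.Int.toStr (PySem.Int.mod timeToOpen 60) ++ " minute"]
      if PySem.Int.mod timeToOpen 60 > 1 then pvModLast time_list (fun s => s ++ "s")
      else time_list
    else time_list
  let time_list :=
    if time_list.length > 2 then
      let time_list := pvModLast time_list (fun s => "and " ++ s)
      let time_list := time_list.map (fun s => ", " ++ s)
      PySem.List.pySetD time_list 0 (PySem.Str.slice (PySem.List.pyGetD time_list 0 "") (some 2) none)
    else
      if time_list.length > 1 then pvModLast time_list (fun s => " and " ++ s) else time_list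
  PySem.Str.join "" time_list

-- ===== PORT B =====
-- helper `unit(v, name)` of Source B
def pvUnit (v : Int) (name : String) : String :=
  PySem.Int.toStr v ++ " " ++ name ++ (if v > 1 then "s" else "")

def p_time_alt (timeToOpen : Int) : String :=
  let days := Int.tdiv timeToOpen 1440
  let hours := PySem.Int.mod (Int.tdiv timeToOpen 60) 24
  let minutes := PySem.Int.mod timeToOpen 60
  match decide (days > 0), decide (hours > 0), decide (minutes > 0) with
  | false, false, false => ""
  | false, false, true  => pvUnit minutes "minute"
  | false, true,  false => pvUnit hours "hour"
  | true,  false, false => pvUnit days "day"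
  | false, true,  true  => pvUnit hours "hour" ++ " and " ++ pvUnit minutes "minute"
  | true,  false, true  => pvUnit days "day" ++ " and " ++ pvUnit minutes "minute"
  | true,  true,  false => pvUnit days "day" ++ " and " ++ pvUnit hours "hour"
  | true,  true,  true  =>
      pvUnit days "day" ++ ", " ++ pvUnit hours "hour" ++ ", and " ++ pvUnit minutes "minute"

-- ===== PRECONDITION & SPEC =====
def Spec_p_time (timeToOpen : Int) (out : String) : Prop := out = p_time_alt timeToOpen
instance (timeToOpen : Int) (out : String) : Decidable (Spec_p_time timeToOpen out) := by unfold Spec_p_time; infer_instance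

-- ===== CLAIM (what is proved, stated in full; the proofs are below) =====
def Claim_equal_p_time : Prop := ∀ (timeToOpen : Int), Dom_p_time timeToOpen → Spec_p_time timeToOpen (p_time timeToOpen)

-- ===== LEMMAS AND PROOFS =====
theorem pvModLast_one (a : String) (f : String → String) : pvModLast [a] f = [f a] := rfl
theorem pvModLast_two (a b : String) (f : String → String) : pvModLast [a, b] f = [a, f b] := rfl
theorem pvModLast_three (a b c : String) (f : String → String) :
    pvModLast [a, b, c] f = [a, b, f c] := rfl

set_option maxHeartbeats 2000000 in
theorem p_time_eq_alt (t : Int) : p_time t = p_time_alt t := by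
  unfold p_time p_time_alt pvUnit
  rw [show Int.tdiv t 1440 = Int.tdiv t (60 * 24) by norm_num,
    show PySem.Int.mod (Int.tdiv t 60) 24 = Int.tdiv t 60 % 24 from
      PySem.Int.mod_eq_emod_of_pos (by norm_num),
    show PySem.Int.mod t 60 = t % 60 from PySem.Int.mod_eq_emod_of_pos (by norm_num)]
  by_cases h1 : Int.tdiv t (60 * 24) > 0 <;>
    by_cases h2 : Int.tdiv t (60 * 24) > 1 <;>
    by_cases h3 : Int.tdiv t 60 % 24 > 0 <;>
    by_cases h4 : Int.tdiv t 60 % 24 > 1 <;>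
    by_cases h5 : t % 60 > 0 <;>
    by_cases h6 : t % 60 > 1 <;>
    simp only [h1, h2, h3, h4, h5, h6, decide_true, decide_false, if_false,
      List.nil_append, List.cons_append, pvModLast_one, pvModLast_two, pvModLast_three,
      List.length_cons, List.length_nil, if_pos] <;>
    (try norm_num [PySem.List.pySetD, PySem.List.pySet?, PySem.List.pyGetD, PySem.List.pyGet?,
       PySem.List.pyIdx?, PySem.Str.slice];
     try rw [← String.toList_inj];
     simp only [PySem.Str.toList_join, List.map_cons, List.map_nil, String.toList_append,
       PySem.Chars.join_cons_cons,
       PySem.Chars.join_singleton, PySem.Chars.join_nil];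
     try norm_num;
     try simp [PySem.List.slice_from];
     try omega)

-- ===== VERDICT (by name: the statement is the Claim_ definition above) =====
theorem p_time_spec : Claim_equal_p_time := by
  intro t _
  exact p_time_eq_alt t
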